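-- pv_equiv track=rewrite | github.com/linhnt31/Python | Competitive Progamming/CodeSignal/Tourements/19_04_2019.py | oddNumbersBeforeZero
-- ===== SOURCE A (Python) =====
-- def oddNumbersBeforeZero(sequence):
--     count = 0
--     for x in sequence:
--         if x == 0:
--             break
--         elif x % 2 != 0:
--             count += 1
--     return count
-- ===== SOURCE B (Python) =====
-- def oddNumbersBeforeZero(sequence):
--     try:
--         stop = sequence.index(0)
--     except ValueError:
--         stop = len(sequence)
--     return sum(x % 2 for x in sequence[:stop])
-- ===== Notes on version B (the rewrite author's own statement) =====
-- stated objective: alternative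
-- what changed: Instead of one accumulate-with-break loop, B first locates the first zero with list.index (falling back to the length), slices the prefix before it, and returns the arithmetic sum of the residues x % 2 over that slice (no conditional counting).
import Mathlib
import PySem

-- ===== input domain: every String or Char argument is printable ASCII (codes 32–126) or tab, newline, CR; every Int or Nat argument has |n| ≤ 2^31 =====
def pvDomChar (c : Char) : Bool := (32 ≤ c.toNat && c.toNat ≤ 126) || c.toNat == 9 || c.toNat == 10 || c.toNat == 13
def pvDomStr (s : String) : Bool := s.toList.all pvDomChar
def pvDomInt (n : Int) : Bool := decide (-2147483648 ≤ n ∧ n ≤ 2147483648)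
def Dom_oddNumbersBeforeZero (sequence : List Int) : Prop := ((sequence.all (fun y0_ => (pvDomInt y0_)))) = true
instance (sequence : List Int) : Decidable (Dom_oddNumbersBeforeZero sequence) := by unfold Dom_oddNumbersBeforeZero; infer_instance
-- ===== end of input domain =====

-- B replaces A's accumulate-with-break loop by: locate the first zero with list.index
-- (falling back to the length), slice the prefix before it, and sum the residues x % 2
-- over that slice (alternative decomposition; same cost).

-- ===== PORT A =====
-- A's for-loop with `break`: structural recursion carrying the count accumulator.
def oddNumbersBeforeZeroLoop : List Int → Int → Int
  | [], count => count
  | x :: rest, count =>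
    if x == 0 then count
    else if PySem.Int.mod x 2 != 0 then oddNumbersBeforeZeroLoop rest (count + 1)
    else oddNumbersBeforeZeroLoop rest count

def oddNumbersBeforeZero (sequence : List Int) : Int :=
  oddNumbersBeforeZeroLoop sequence 0

-- ===== PORT B =====
-- Source B: stop = sequence.index(0) (ValueError → len(sequence)); sum(x % 2 for x in sequence[:stop])
def oddNumbersBeforeZero_alt (sequence : List Int) : Int :=
  let stop : Int :=
    match PySem.List.index? sequence 0 with
    | some k => (k : Int)
    | none => (sequence.length : Int)
  ((PySem.List.slice sequence none (some stop)).map (fun x => PySem.Int.mod x 2)).sum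

-- ===== PRECONDITION & SPEC =====
def Spec_oddNumbersBeforeZero (sequence : List Int) (out : Int) : Prop := out = oddNumbersBeforeZero_alt sequence
instance (sequence : List Int) (out : Int) : Decidable (Spec_oddNumbersBeforeZero sequence out) := by unfold Spec_oddNumbersBeforeZero; infer_instance

-- ===== CLAIM (what is proved, stated in full; the proofs are below) =====
def Claim_equal_oddNumbersBeforeZero : Prop := ∀ (sequence : List Int), Dom_oddNumbersBeforeZero sequence → Spec_oddNumbersBeforeZero sequence (oddNumbersBeforeZero sequence)

-- ===== LEMMAS AND PROOFS =====

-- B's slice-to-first-zero prefix is the takeWhile (· ≠ 0) prefix.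
theorem take_stop_eq_takeWhile (sequence : List Int) :
    (PySem.List.slice sequence none
        (some (match PySem.List.index? sequence 0 with
               | some k => (k : Int)
               | none => (sequence.length : Int))))
      = sequence.takeWhile (fun x => x != 0) := by
  induction sequence with
  | nil => decide
  | cons x rest ih =>
    by_cases hx : x = 0
    · subst hx
      rw [PySem.List.index?_cons_self]
      simp [PySem.List.slice_to _ (by omega : (0:Int) ≤ 0)]
    · have hxb : (x != 0) = true := by simpa using hx
      rw [PySem.List.index?_cons_of_ne rest hx,
        List.takeWhile_cons_of_pos (p := fun y => y != 0) (l := rest) (a := x) hxb, ← ih]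
      cases h : PySem.List.index? rest 0 with
      | some k =>
        simp only [Option.map_some]
        rw [PySem.List.slice_to_natCast, PySem.List.slice_to_natCast,
          List.take_succ_cons]
      | none =>
        simp only [Option.map_none]
        rw [show ((x :: rest).length : Int) = (((rest.length + 1 : Nat) : Nat) : Int) by simp]
        rw [PySem.List.slice_to_natCast, PySem.List.slice_to_natCast,
          List.take_succ_cons]

-- A's loop computes count plus the sum of residues over the takeWhile prefix.
theorem oddNumbersBeforeZeroLoop_eq (sequence : List Int) (count : Int) :
    oddNumbersBeforeZeroLoop sequence count =
      count + ((sequence.takeWhile (fun x => x != 0)).map (fun x => PySem.Int.mod x 2)).sum := by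
  induction sequence generalizing count with
  | nil => simp [oddNumbersBeforeZeroLoop]
  | cons x rest ih =>
    by_cases hx : x = 0
    · simp [oddNumbersBeforeZeroLoop, hx]
    · have hxb : (x != 0) = true := by simpa using hx
      rw [List.takeWhile_cons_of_pos (p := fun y => y != 0) (l := rest) (a := x) hxb]
      rcases PySem.Int.mod_two_eq x with ho | ho
      · simp only [oddNumbersBeforeZeroLoop]
        rw [if_neg (by simpa using hx), if_neg (by simp only [ho]; decide), ih,
          List.map_cons, List.sum_cons, ho]
        ring
      · simp only [oddNumbersBeforeZeroLoop]
        rw [if_neg (by simpa using hx), if_pos (by simp only [ho]; decide), ih,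
          List.map_cons, List.sum_cons, ho]
        ring

-- ===== VERDICT (by name: the statement is the Claim_ definition above) =====
theorem oddNumbersBeforeZero_spec : Claim_equal_oddNumbersBeforeZero := by
  intro s _
  show _ = _
  rw [oddNumbersBeforeZero, oddNumbersBeforeZeroLoop_eq, oddNumbersBeforeZero_alt]
  rw [take_stop_eq_takeWhile]
  ring
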